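-- pv_equiv track=rewrite | github.com/vitalfocheux/Advent-Of-Code | 2018/23/23.py | part2
-- ===== SOURCE A (Python) =====
-- from queue import PriorityQueue
--
-- def part2(nanobots):
--     q = PriorityQueue()
--     for (x, y, z), r in nanobots:
--         d = abs(x) + abs(y) + abs(z)
--         q.put((max(0, d - r),1))
--         q.put((d + r + 1,-1))
--     count = max_count = max_dist = 0
--     while not q.empty():
--         dist, e = q.get()
--         count += e
--         if count > max_count:
--             max_count = count
--             max_dist = dist
--     return max_dist
-- ===== SOURCE B (Python) =====
-- def part2(nanobots):
--     starts = [max(0, abs(x) + abs(y) + abs(z) - r) for (x, y, z), r in nanobots]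
--     ends = [abs(x) + abs(y) + abs(z) + r + 1 for (x, y, z), r in nanobots]
--     best_count = 0
--     best_dist = 0
--     for p in starts:
--         c = sum(1 for s in starts if s <= p) - sum(1 for e in ends if e <= p)
--         if c > best_count or (c == best_count and p < best_dist):
--             best_count = c
--             best_dist = p
--     return best_dist
-- ===== Notes on version B (the rewrite author's own statement) =====
-- stated objective: alternative
-- what changed: Replaces the sorted event sweep (PriorityQueue of +1/-1 endpoint events drained while tracking a running count) by a sort-free brute-force scan: for each candidate start coordinate it counts directly how many intervals cover it, keeping the best (max coverage, then smallest coordinate).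
import Mathlib
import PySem

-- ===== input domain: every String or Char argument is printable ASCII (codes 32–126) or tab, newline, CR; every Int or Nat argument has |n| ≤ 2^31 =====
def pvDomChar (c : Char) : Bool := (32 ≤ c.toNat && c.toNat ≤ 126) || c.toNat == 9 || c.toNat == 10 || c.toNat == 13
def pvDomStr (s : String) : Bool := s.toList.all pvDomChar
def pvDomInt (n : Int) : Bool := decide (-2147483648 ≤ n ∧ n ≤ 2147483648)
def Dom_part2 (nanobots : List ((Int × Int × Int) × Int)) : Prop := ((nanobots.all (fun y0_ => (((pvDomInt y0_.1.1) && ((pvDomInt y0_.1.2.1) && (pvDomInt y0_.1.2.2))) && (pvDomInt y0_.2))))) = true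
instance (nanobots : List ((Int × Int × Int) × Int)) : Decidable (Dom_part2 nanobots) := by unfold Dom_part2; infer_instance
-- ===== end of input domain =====

-- B replaces A's sorted event sweep by a sort-free brute-force scan over candidate start
-- coordinates, counting the covering intervals of each directly; objective: alternative.

-- ===== PORT A =====
-- The PriorityQueue drain: the queued (dist, e) tuples are popped in Python tuple
-- (lexicographic) order, i.e. the while-loop is a fold over sorted2 of the inserted events.
def part2 (nanobots : List ((Int × Int × Int) × Int)) : Int :=
  let events := nanobots.foldl (fun q b =>
    let d := |b.1.1| + |b.1.2.1| + |b.1.2.2|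
    q ++ [(max 0 (d - b.2), (1 : Int)), (d + b.2 + 1, (-1 : Int))]) []
  let sortedEv := PySem.List.sorted2 events (fun p => p.1) (fun p => p.2) false
  let final := sortedEv.foldl (fun st p =>
    let count := st.1 + p.2
    if st.2.1 < count then (count, count, p.1) else (count, st.2.1, st.2.2))
    ((0 : Int), (0 : Int), (0 : Int))
  final.2.2

-- ===== PORT B =====
-- Source B: for each candidate start coordinate p, count the intervals covering p directly
-- (two membership-count scans), keeping (best_count, best_dist) with the update rule
-- "strictly more coverage, or equal coverage at a smaller coordinate".
def part2_alt (nanobots : List ((Int × Int × Int) × Int)) : Int :=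
  let starts := nanobots.map (fun b => max 0 (|b.1.1| + |b.1.2.1| + |b.1.2.2| - b.2))
  let ends := nanobots.map (fun b => |b.1.1| + |b.1.2.1| + |b.1.2.2| + b.2 + 1)
  let final := starts.foldl (fun st p =>
    let c : Int := (starts.countP (fun s => decide (s ≤ p)) : Int)
                 - (ends.countP (fun e => decide (e ≤ p)) : Int)
    if st.1 < c ∨ (c = st.1 ∧ p < st.2) then (c, p) else st) ((0 : Int), (0 : Int))
  final.2

-- ===== PRECONDITION & SPEC =====
def Spec_part2 (nanobots : List ((Int × Int × Int) × Int)) (out : Int) : Prop := out = part2_alt nanobots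
instance (nanobots : List ((Int × Int × Int) × Int)) (out : Int) : Decidable (Spec_part2 nanobots out) := by unfold Spec_part2; infer_instance

-- ===== CLAIM (what is proved, stated in full; the proofs are below) =====
def Claim_equal_part2 : Prop := ∀ (nanobots : List ((Int × Int × Int) × Int)), Dom_part2 nanobots → Spec_part2 nanobots (part2 nanobots)

-- ===== LEMMAS AND PROOFS =====

-- coverage of a point p: number of open intervals [start, end) containing p
def covOf (s e : List Int) (p : Int) : Int :=
  ((s.countP (fun x => decide (x ≤ p)) : Int) - (e.countP (fun x => decide (x ≤ p)) : Int))

-- sum of the ±1 tags of an event list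
def tagSum (l : List (Int × Int)) : Int := l.foldr (fun x acc => x.2 + acc) 0

@[simp] theorem tagSum_nil : tagSum [] = 0 := rfl
@[simp] theorem tagSum_cons (x : Int × Int) (l : List (Int × Int)) :
    tagSum (x :: l) = x.2 + tagSum l := rfl

-- the maximum running prefix sum of A's sweep, with the coordinate of the event at whose
-- prefix it is first attained (none on the empty list)
def mp (c : Int) : List (Int × Int) → Option (Int × Int)
  | [] => none
  | x :: r =>
    match mp (c + x.2) r with
    | none => some (c + x.2, x.1)
    | some (v, q) => if v ≤ c + x.2 then some (c + x.2, x.1) else some (v, q)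

-- the Python tuple order on (dist, tag) pairs
def keyle (x y : Int × Int) : Prop := x.1 < y.1 ∨ (x.1 = y.1 ∧ x.2 ≤ y.2)

-- A's sorted2 under the Python tuple order is sorted with the lexicographic key
theorem sorted2_eq_sorted_toLex (xs : List (Int × Int)) :
    PySem.List.sorted2 xs (fun p => p.1) (fun p => p.2) false
      = PySem.List.sorted xs (fun p => toLex (p.1, p.2)) false := by
  rw [PySem.List.sorted_eq_foldl_insertBy]
  show List.foldl (fun acc x => PySem.List.insertBy (fun a b : Int × Int => decide (a.1 < b.1) || !decide (b.1 < a.1) && decide (a.2 < b.2)) x acc) [] xs = _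
  congr 1
  funext acc x
  congr 1
  funext a b
  rw [Bool.eq_iff_iff]
  simp only [Bool.or_eq_true, Bool.and_eq_true, Bool.not_eq_true', decide_eq_true_eq,
    decide_eq_false_iff_not, Prod.Lex.lt_iff, ofLex_toLex]
  omega

-- A's event list is a permutation of the tagged starts ++ ends
theorem eventsA_perm (nanobots : List ((Int × Int × Int) × Int)) :
    (nanobots.foldl (fun q b =>
      let d := |b.1.1| + |b.1.2.1| + |b.1.2.2|
      q ++ [(max 0 (d - b.2), (1 : Int)), (d + b.2 + 1, (-1 : Int))]) []).Perm
    ((nanobots.map fun b => max 0 (|b.1.1| + |b.1.2.1| + |b.1.2.2| - b.2)).map (fun a => (a, (1 : Int)))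
      ++ (nanobots.map fun b => |b.1.1| + |b.1.2.1| + |b.1.2.2| + b.2 + 1).map (fun b => (b, (-1 : Int)))) := by
  rw [PySem.List.foldl_append_eq_flatMap]
  induction nanobots with
  | nil => simp
  | cons b l ih =>
      simp only [List.flatMap_cons, List.map_cons, List.cons_append, List.nil_append]
      refine List.Perm.cons _ ?_
      exact (ih.cons _).trans List.perm_middle.symm

-- the sweep fold computed from mp: running count is c + tagSum, and (max_count, max_dist)
-- is the max-prefix value with its first coordinate, if it beats the incoming maximum
theorem sweep_eq (ev : List (Int × Int)) : ∀ (c m d : Int),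
    ev.foldl (fun st p =>
      let count := st.1 + p.2
      if st.2.1 < count then (count, count, p.1) else (count, st.2.1, st.2.2)) (c, m, d)
    = (c + tagSum ev,
        match mp c ev with
        | none => (m, d)
        | some (v, q) => if m < v then (v, q) else (m, d)) := by
  induction ev with
  | nil => intro c m d; simp [mp]
  | cons x r ih =>
      intro c m d
      show List.foldl (fun st p =>
          let count := st.1 + p.2
          if st.2.1 < count then (count, count, p.1) else (count, st.2.1, st.2.2))
          (if m < c + x.2 then ((c + x.2, c + x.2, x.1) : Int × Int × Int) else (c + x.2, m, d)) r = _
      by_cases h : m < c + x.2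
      · rw [if_pos h, ih]
        cases hm : mp (c + x.2) r with
        | none =>
            simp only [mp, hm]
            try dsimp only
            rw [if_pos h]
            exact Prod.ext (by simp only [tagSum_cons]; ring) rfl
        | some vq =>
            obtain ⟨v, q⟩ := vq
            simp only [mp, hm]
            by_cases hv : v ≤ c + x.2
            · rw [if_neg (show ¬ c + x.2 < v by omega), if_pos hv]
              try dsimp only
              rw [if_pos h]
              exact Prod.ext (by simp only [tagSum_cons]; ring) rfl
            · rw [if_pos (show c + x.2 < v by omega), if_neg hv]
              try dsimp only
              rw [if_pos (show m < v by omega)]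
              exact Prod.ext (by simp only [tagSum_cons]; ring) rfl
      · rw [if_neg h, ih]
        cases hm : mp (c + x.2) r with
        | none =>
            simp only [mp, hm]
            try dsimp only
            rw [if_neg h]
            exact Prod.ext (by simp only [tagSum_cons]; ring) rfl
        | some vq =>
            obtain ⟨v, q⟩ := vq
            simp only [mp, hm]
            by_cases hv : v ≤ c + x.2
            · rw [if_pos hv]
              try dsimp only
              rw [if_neg h, if_neg (show ¬ m < v by omega)]
              exact Prod.ext (by simp only [tagSum_cons]; ring) rfl
            · rw [if_neg hv]
              try dsimp only
              by_cases hmv : m < v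
              · rw [if_pos hmv]
                exact Prod.ext (by simp only [tagSum_cons]; ring) rfl
              · rw [if_neg hmv]
                exact Prod.ext (by simp only [tagSum_cons]; ring) rfl

-- mp returns the maximal prefix-sum over all splits, attained at the earliest such split
theorem mp_spec : ∀ (ev : List (Int × Int)) (c : Int), ev ≠ [] →
    ∃ v q l x r, mp c ev = some (v, q) ∧ ev = l ++ x :: r ∧ x.1 = q ∧
      v = c + tagSum l + x.2 ∧
      ∀ l' x' r', ev = l' ++ x' :: r' →
        c + tagSum l' + x'.2 < v ∨ (c + tagSum l' + x'.2 = v ∧ l.length ≤ l'.length) := by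
  intro ev
  induction ev with
  | nil => intro c h; exact absurd rfl h
  | cons x rest ih =>
      intro c _
      cases rest with
      | nil =>
          refine ⟨c + x.2, x.1, [], x, [], rfl, rfl, rfl, by simp, ?_⟩
          intro l' x' r' hsp
          cases l' with
          | nil =>
              simp only [List.nil_append, List.cons.injEq] at hsp
              obtain ⟨rfl, rfl⟩ := hsp
              exact Or.inr ⟨by simp, Nat.le_refl _⟩
          | cons b l'' =>
              simp only [List.cons_append, List.cons.injEq] at hsp
              exact absurd hsp.2.symm (List.cons_ne_nil _ _ ∘ (List.append_eq_nil_iff.mp · |>.2))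
      | cons y rest' =>
          obtain ⟨v, q, l1, x1, r1, hmp, hsp1, hq1, hv1, hmax1⟩ :=
            ih (c + x.2) (List.cons_ne_nil _ _)
          by_cases hv : v ≤ c + x.2
          · refine ⟨c + x.2, x.1, [], x, y :: rest', ?_, rfl, rfl, by simp, ?_⟩
            · show (match mp (c + x.2) (y :: rest') with
                  | none => some (c + x.2, x.1)
                  | some (v, q) => if v ≤ c + x.2 then some (c + x.2, x.1) else some (v, q)) = _
              rw [hmp]
              exact if_pos hv
            · intro l' x' r' hsp
              cases l' with
              | nil =>
                  simp only [List.nil_append, List.cons.injEq] at hsp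
                  obtain ⟨rfl, rfl⟩ := hsp
                  exact Or.inr ⟨by simp, Nat.zero_le _⟩
              | cons b l'' =>
                  simp only [List.cons_append, List.cons.injEq] at hsp
                  obtain ⟨rfl, hsp⟩ := hsp
                  rcases hmax1 l'' x' r' hsp with hlt | ⟨heq, _⟩
                  · exact Or.inl (by simp only [tagSum_cons]; omega)
                  · rcases lt_or_eq_of_le hv with hlt2 | heq2
                    · exact Or.inl (by simp only [tagSum_cons]; omega)
                    · exact Or.inr ⟨by simp only [tagSum_cons]; omega, Nat.zero_le _⟩
          · refine ⟨v, q, x :: l1, x1, r1, ?_, by rw [hsp1]; rfl, hq1,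
              by simp only [tagSum_cons]; omega, ?_⟩
            · show (match mp (c + x.2) (y :: rest') with
                  | none => some (c + x.2, x.1)
                  | some (v, q) => if v ≤ c + x.2 then some (c + x.2, x.1) else some (v, q)) = _
              rw [hmp]
              exact if_neg hv
            · intro l' x' r' hsp
              cases l' with
              | nil =>
                  simp only [List.nil_append, List.cons.injEq] at hsp
                  obtain ⟨rfl, rfl⟩ := hsp
                  exact Or.inl (by simp only [tagSum_nil]; omega)
              | cons b l'' =>
                  simp only [List.cons_append, List.cons.injEq] at hsp
                  obtain ⟨rfl, hsp⟩ := hsp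
                  rcases hmax1 l'' x' r' hsp with hlt | ⟨heq, hlen⟩
                  · exact Or.inl (by simp only [tagSum_cons]; omega)
                  · exact Or.inr ⟨by simp only [tagSum_cons]; omega,
                      by simpa using Nat.succ_le_succ hlen⟩

-- B's fold is a maximum-selection: result is initial or a candidate, no candidate beats it,
-- and it is the initial state or strictly beats it
theorem foldB (s e : List Int) : ∀ (xs : List Int) (acc r : Int × Int),
    r = xs.foldl (fun st p =>
        let c := covOf s e p
        if st.1 < c ∨ (c = st.1 ∧ p < st.2) then (c, p) else st) acc →
      (r = acc ∨ (r.2 ∈ xs ∧ r.1 = covOf s e r.2)) ∧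
      (∀ p ∈ xs, ¬ (r.1 < covOf s e p ∨ (covOf s e p = r.1 ∧ p < r.2))) ∧
      (r = acc ∨ (acc.1 < r.1 ∨ (r.1 = acc.1 ∧ r.2 < acc.2))) := by
  intro xs
  induction xs with
  | nil =>
      intro acc r hr
      subst hr
      exact ⟨Or.inl rfl, by simp, Or.inl rfl⟩
  | cons p xs ih =>
      intro acc r hr
      rw [List.foldl_cons] at hr
      by_cases hc : acc.1 < covOf s e p ∨ (covOf s e p = acc.1 ∧ p < acc.2)
      · have hr' : r = List.foldl (fun st p =>
            let c := covOf s e p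
            if st.1 < c ∨ (c = st.1 ∧ p < st.2) then (c, p) else st)
            (if acc.1 < covOf s e p ∨ (covOf s e p = acc.1 ∧ p < acc.2)
              then ((covOf s e p, p) : Int × Int) else acc) xs := hr
        rw [if_pos hc] at hr'
        obtain ⟨h1, h2, h3⟩ := ih (covOf s e p, p) r hr'
        refine ⟨?_, ?_, ?_⟩
        · rcases h1 with rfl | ⟨hm, he⟩
          · exact Or.inr ⟨List.mem_cons_self, rfl⟩
          · exact Or.inr ⟨List.mem_cons_of_mem _ hm, he⟩
        · intro t ht
          rcases List.mem_cons.mp ht with rfl | ht'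
          · rcases h3 with rfl | hb
            · simp only []
              omega
            · have := h2
              obtain ⟨r1, r2⟩ := r
              dsimp only at hb ⊢
              omega
          · exact h2 t ht'
        · rcases h3 with rfl | hb
          · exact Or.inr (by obtain ⟨a1, a2⟩ := acc; dsimp only at hc ⊢; omega)
          · refine Or.inr ?_
            obtain ⟨r1, r2⟩ := r
            obtain ⟨a1, a2⟩ := acc
            dsimp only at hb hc ⊢
            omega
      · have hr' : r = List.foldl (fun st p =>
            let c := covOf s e p
            if st.1 < c ∨ (c = st.1 ∧ p < st.2) then (c, p) else st)
            (if acc.1 < covOf s e p ∨ (covOf s e p = acc.1 ∧ p < acc.2)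
              then ((covOf s e p, p) : Int × Int) else acc) xs := hr
        rw [if_neg hc] at hr'
        obtain ⟨h1, h2, h3⟩ := ih acc r hr'
        refine ⟨?_, ?_, ?_⟩
        · rcases h1 with rfl | ⟨hm, he⟩
          · exact Or.inl rfl
          · exact Or.inr ⟨List.mem_cons_of_mem _ hm, he⟩
        · intro t ht
          rcases List.mem_cons.mp ht with rfl | ht'
          · rcases h3 with rfl | hb
            · exact hc
            · obtain ⟨r1, r2⟩ := r
              obtain ⟨a1, a2⟩ := acc
              dsimp only at hb hc ⊢
              omega
          · exact h2 t ht'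
        · exact h3

-- counting events over the permutation: a countP of ev splits into countPs of s and e
theorem countP_ev (s e : List Int) (ev : List (Int × Int))
    (hperm : ev.Perm (s.map (fun a => (a, (1 : Int))) ++ e.map (fun b => (b, (-1 : Int)))))
    (P : Int × Int → Bool) :
    ev.countP P = s.countP (fun a => P (a, 1)) + e.countP (fun b => P (b, -1)) := by
  rw [hperm.countP_eq, List.countP_append, List.countP_map, List.countP_map]
  rfl

-- every event carries tag 1 or -1, and its coordinate comes from the matching list
theorem ev_tags (s e : List Int) (ev : List (Int × Int))
    (hperm : ev.Perm (s.map (fun a => (a, (1 : Int))) ++ e.map (fun b => (b, (-1 : Int))))) :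
    ∀ x ∈ ev, (x.2 = 1 ∧ x.1 ∈ s) ∨ (x.2 = -1 ∧ x.1 ∈ e) := by
  intro x hx
  have hx' := hperm.mem_iff.mp hx
  simp only [List.mem_append, List.mem_map] at hx'
  rcases hx' with ⟨a, ha, rfl⟩ | ⟨b, hb, rfl⟩
  · exact Or.inl ⟨rfl, ha⟩
  · exact Or.inr ⟨rfl, hb⟩

-- the tag sum of a ±1-tagged list counts its starts minus its ends
theorem tagSum_eq_counts : ∀ (l : List (Int × Int)), (∀ x ∈ l, x.2 = 1 ∨ x.2 = -1) →
    tagSum l = (l.countP (fun y => decide (y.2 = 1)) : Int)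
             - (l.countP (fun y => decide (y.2 = -1)) : Int) := by
  intro l
  induction l with
  | nil => intro _; simp
  | cons x t ih =>
      intro h
      have hx := h x List.mem_cons_self
      have ht := ih (fun y hy => h y (List.mem_cons_of_mem _ hy))
      rcases hx with h1 | h1 <;>
        · simp [tagSum_cons, h1, ht]
          ring

-- a split of a keyle-sorted list bounds both sides against the middle element
theorem split_sorted {ev l r : List (Int × Int)} {x : Int × Int}
    (hsort : ev.Pairwise keyle) (hsp : ev = l ++ x :: r) :
    (∀ a ∈ l, keyle a x) ∧ (∀ b ∈ r, keyle x b) := by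
  subst hsp
  rw [List.pairwise_append] at hsort
  obtain ⟨_, h2, h3⟩ := hsort
  exact ⟨fun a ha => h3 a ha x List.mem_cons_self, (List.pairwise_cons.mp h2).1⟩

-- a nonempty list of integers has a maximal element
theorem list_exists_max : ∀ (l : List Int), l ≠ [] → ∃ a ∈ l, ∀ b ∈ l, b ≤ a := by
  intro l
  induction l with
  | nil => intro h; exact absurd rfl h
  | cons x t ih =>
      intro _
      cases t with
      | nil => exact ⟨x, List.mem_cons_self, by simp⟩
      | cons y t' =>
          obtain ⟨a, ha, hmax⟩ := ih (List.cons_ne_nil _ _)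
          by_cases hxa : x ≤ a
          · refine ⟨a, List.mem_cons_of_mem _ ha, ?_⟩
            intro b hb
            rcases List.mem_cons.mp hb with rfl | hb'
            · exact hxa
            · exact hmax b hb'
          · refine ⟨x, List.mem_cons_self, ?_⟩
            intro b hb
            rcases List.mem_cons.mp hb with rfl | hb'
            · exact le_refl _
            · exact le_trans (hmax b hb') (by omega)

-- strictly-below-q interval balance is at most some coverage value (or ≤ 0 with no start below q)
theorem below_bound (s e : List Int) (q C : Int)
    (hub : ∀ p ∈ s, covOf s e p ≤ C) (hC : 0 ≤ C) :
    (s.countP (fun a => decide (a < q)) : Int) - (e.countP (fun b => decide (b < q)) : Int) ≤ C := by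
  by_cases hz : s.countP (fun a => decide (a < q)) = 0
  · omega
  · have hfil : s.filter (fun a => decide (a < q)) ≠ [] := by
      intro hnil
      rw [List.countP_eq_length_filter, hnil] at hz
      exact hz rfl
    obtain ⟨a, ha, hmax⟩ := list_exists_max _ hfil
    have haq : a ∈ s ∧ a < q := by simpa using List.mem_filter.mp ha
    have hsc : s.countP (fun x => decide (x < q)) = s.countP (fun x => decide (x ≤ a)) := by
      refine List.countP_congr ?_
      intro y hy
      constructor
      · intro h
        have hya : y ∈ s.filter (fun a => decide (a < q)) := List.mem_filter.mpr ⟨hy, h⟩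
        simpa using hmax y hya
      · intro h
        simp only [decide_eq_true_eq] at h ⊢
        omega
    have hec : e.countP (fun x => decide (x ≤ a)) ≤ e.countP (fun x => decide (x < q)) := by
      refine List.countP_mono_left ?_
      intro y _ h
      simp only [decide_eq_true_eq] at h ⊢
      omega
    have hcov := hub a haq.1
    unfold covOf at hcov
    omega

-- split at a start event: the prefix sum is at most the coverage of its coordinate,
-- with equality when the split is at the last copy of the event
theorem start_split_le (s e : List Int) (ev l r : List (Int × Int)) (q : Int)
    (hperm : ev.Perm (s.map (fun a => (a, (1 : Int))) ++ e.map (fun b => (b, (-1 : Int)))))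
    (hsort : ev.Pairwise keyle) (hsp : ev = l ++ (q, 1) :: r) :
    tagSum l + 1 ≤ covOf s e q ∧ (((q, (1 : Int)) ∉ r) → tagSum l + 1 = covOf s e q) := by
  obtain ⟨hl, hr⟩ := split_sorted hsort hsp
  have htags : ∀ x ∈ l, x.2 = 1 ∨ x.2 = -1 := by
    intro x hx
    rcases ev_tags s e ev hperm x (by rw [hsp]; exact List.mem_append_left _ hx) with ⟨h, _⟩ | ⟨h, _⟩
    · exact Or.inl h
    · exact Or.inr h
  have hts := tagSum_eq_counts l htags
  have hcs : l.countP (fun y => decide (y.2 = 1))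
      = l.countP (fun y => decide (y.2 = 1) && decide (y.1 ≤ q)) := by
    refine List.countP_congr ?_
    intro y hy
    have := hl y hy
    unfold keyle at this
    simp only [decide_eq_true_eq, Bool.and_eq_true]
    constructor
    · intro h; exact ⟨h, by omega⟩
    · intro h; exact h.1
  have hce : l.countP (fun y => decide (y.2 = -1))
      = l.countP (fun y => decide (y.2 = -1) && decide (y.1 ≤ q)) := by
    refine List.countP_congr ?_
    intro y hy
    have := hl y hy
    unfold keyle at this
    simp only [decide_eq_true_eq, Bool.and_eq_true]
    constructor
    · intro h; exact ⟨h, by omega⟩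
    · intro h; exact h.1
  have hevS : ev.countP (fun y => decide (y.2 = 1) && decide (y.1 ≤ q))
      = s.countP (fun a => decide (a ≤ q)) := by
    rw [countP_ev s e ev hperm]
    simp
  have hevE : ev.countP (fun y => decide (y.2 = -1) && decide (y.1 ≤ q))
      = e.countP (fun b => decide (b ≤ q)) := by
    rw [countP_ev s e ev hperm]
    simp
  have hsplitS : ev.countP (fun y => decide (y.2 = 1) && decide (y.1 ≤ q))
      = l.countP (fun y => decide (y.2 = 1) && decide (y.1 ≤ q)) + 1
        + r.countP (fun y => decide (y.2 = 1) && decide (y.1 ≤ q)) := by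
    rw [hsp, List.countP_append, List.countP_cons]
    simp
    omega
  have hsplitE : ev.countP (fun y => decide (y.2 = -1) && decide (y.1 ≤ q))
      = l.countP (fun y => decide (y.2 = -1) && decide (y.1 ≤ q)) := by
    rw [hsp, List.countP_append, List.countP_cons]
    have hr0 : r.countP (fun y => decide (y.2 = -1) && decide (y.1 ≤ q)) = 0 := by
      rw [List.countP_eq_zero]
      intro y hy
      have := hr y hy
      unfold keyle at this
      simp only [Bool.and_eq_true, decide_eq_true_eq, not_and]
      intro h1 h2
      omega
    simp [hr0]
  constructor
  · unfold covOf
    rw [hts, hcs, hce]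
    omega
  · intro hnr
    have hr1 : r.countP (fun y => decide (y.2 = 1) && decide (y.1 ≤ q)) = 0 := by
      rw [List.countP_eq_zero]
      intro y hy
      have hky := hr y hy
      unfold keyle at hky
      simp only [Bool.and_eq_true, decide_eq_true_eq, not_and]
      intro h1 h2
      have : y = (q, 1) := by
        obtain ⟨y1, y2⟩ := y
        simp only at h1 h2 hky ⊢
        have : y1 = q ∧ y2 = 1 := by omega
        simp [this.1, this.2]
      exact hnr (this ▸ hy)
    unfold covOf
    rw [hts, hcs, hce]
    omega

-- split at an end event: the prefix sum is below the strictly-below-q balance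
theorem end_split_le (s e : List Int) (ev l r : List (Int × Int)) (q : Int)
    (hperm : ev.Perm (s.map (fun a => (a, (1 : Int))) ++ e.map (fun b => (b, (-1 : Int)))))
    (hsort : ev.Pairwise keyle) (hsp : ev = l ++ (q, -1) :: r) :
    tagSum l ≤ (s.countP (fun a => decide (a < q)) : Int)
             - (e.countP (fun b => decide (b < q)) : Int) := by
  obtain ⟨hl, hr⟩ := split_sorted hsort hsp
  have htags : ∀ x ∈ l, x.2 = 1 ∨ x.2 = -1 := by
    intro x hx
    rcases ev_tags s e ev hperm x (by rw [hsp]; exact List.mem_append_left _ hx) with ⟨h, _⟩ | ⟨h, _⟩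
    · exact Or.inl h
    · exact Or.inr h
  have hts := tagSum_eq_counts l htags
  have hcs : l.countP (fun y => decide (y.2 = 1))
      = l.countP (fun y => decide (y.2 = 1) && decide (y.1 < q)) := by
    refine List.countP_congr ?_
    intro y hy
    have := hl y hy
    unfold keyle at this
    simp only [decide_eq_true_eq, Bool.and_eq_true]
    constructor
    · intro h; exact ⟨h, by omega⟩
    · intro h; exact h.1
  have hcsle : l.countP (fun y => decide (y.2 = 1) && decide (y.1 < q))
      ≤ ev.countP (fun y => decide (y.2 = 1) && decide (y.1 < q)) := by
    rw [hsp, List.countP_append]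
    omega
  have hevS : ev.countP (fun y => decide (y.2 = 1) && decide (y.1 < q))
      = s.countP (fun a => decide (a < q)) := by
    rw [countP_ev s e ev hperm]
    simp
  have hcege : l.countP (fun y => decide (y.2 = -1) && decide (y.1 < q))
      ≤ l.countP (fun y => decide (y.2 = -1)) := by
    refine List.countP_mono_left ?_
    intro y _ h
    exact (Bool.and_eq_true .. ▸ h).1
  have hevE : ev.countP (fun y => decide (y.2 = -1) && decide (y.1 < q))
      = e.countP (fun b => decide (b < q)) := by
    rw [countP_ev s e ev hperm]
    simp
  have hsplitE : ev.countP (fun y => decide (y.2 = -1) && decide (y.1 < q))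
      = l.countP (fun y => decide (y.2 = -1) && decide (y.1 < q)) := by
    rw [hsp, List.countP_append, List.countP_cons]
    have hr0 : r.countP (fun y => decide (y.2 = -1) && decide (y.1 < q)) = 0 := by
      rw [List.countP_eq_zero]
      intro y hy
      have := hr y hy
      unfold keyle at this
      simp only [Bool.and_eq_true, decide_eq_true_eq, not_and]
      intro h1 h2
      omega
    simp [hr0]
  rw [hts, hcs]
  omega

-- a split's prefix contains every event strictly key-below the middle element
theorem split_length_ge (ev l r : List (Int × Int)) (x : Int × Int)
    (hsort : ev.Pairwise keyle) (hsp : ev = l ++ x :: r) :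
    ev.countP (fun y => decide (y.1 < x.1 ∨ (y.1 = x.1 ∧ y.2 < x.2))) ≤ l.length := by
  obtain ⟨_, hr⟩ := split_sorted hsort hsp
  rw [hsp, List.countP_append, List.countP_cons]
  have hx0 : (decide (x.1 < x.1 ∨ (x.1 = x.1 ∧ x.2 < x.2))) = false := by
    simp
  have hr0 : r.countP (fun y => decide (y.1 < x.1 ∨ (y.1 = x.1 ∧ y.2 < x.2))) = 0 := by
    rw [List.countP_eq_zero]
    intro y hy
    have := hr y hy
    unfold keyle at this
    simp only [decide_eq_true_eq]
    omega
  rw [hx0, hr0]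
  simpa using List.countP_le_length (l := l) ..

-- a split at the last copy of x has prefix length exactly (number of events key-≤ x) - 1
theorem split_length_last (ev l r : List (Int × Int)) (x : Int × Int)
    (hsort : ev.Pairwise keyle) (hsp : ev = l ++ x :: r) (hnr : x ∉ r) :
    l.length + 1 = ev.countP (fun y => decide (y.1 < x.1 ∨ (y.1 = x.1 ∧ y.2 ≤ x.2))) := by
  obtain ⟨hl, hr⟩ := split_sorted hsort hsp
  rw [hsp, List.countP_append, List.countP_cons]
  have hlfull : l.countP (fun y => decide (y.1 < x.1 ∨ (y.1 = x.1 ∧ y.2 ≤ x.2))) = l.length :=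
    List.countP_eq_length.mpr (fun y hy => by
      have h := hl y hy
      unfold keyle at h
      simpa using h)
  have hx1 : (decide (x.1 < x.1 ∨ (x.1 = x.1 ∧ x.2 ≤ x.2))) = true := by
    simp
  have hr0 : r.countP (fun y => decide (y.1 < x.1 ∨ (y.1 = x.1 ∧ y.2 ≤ x.2))) = 0 := by
    rw [List.countP_eq_zero]
    intro y hy
    have := hr y hy
    unfold keyle at this
    simp only [decide_eq_true_eq]
    intro hky
    apply hnr
    have : y = x := by
      obtain ⟨y1, y2⟩ := y
      obtain ⟨x1, x2⟩ := x
      simp only at this hky ⊢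
      have : y1 = x1 ∧ y2 = x2 := by omega
      simp [this.1, this.2]
    exact this ▸ hy
  rw [hlfull, hx1, hr0]
  simp

-- the last copy of a member yields a split with nothing equal after it
theorem exists_split_last {α : Type} [DecidableEq α] {x : α} :
    ∀ {l : List α}, x ∈ l → ∃ l₁ l₂, l = l₁ ++ x :: l₂ ∧ x ∉ l₂ := by
  intro l
  induction l with
  | nil => intro h; exact absurd h (List.not_mem_nil)
  | cons y t ih =>
      intro h
      by_cases hx : x ∈ t
      · obtain ⟨l₁, l₂, h1, h2⟩ := ih hx
        exact ⟨y :: l₁, l₂, by simp [h1], h2⟩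
      · have hxy : x = y := by
          rcases List.mem_cons.mp h with h' | h'
          · exact h'
          · exact absurd h' hx
        subst hxy
        exact ⟨[], t, rfl, hx⟩

-- the two sides agree, generically: ev is any keyle-sorted arrangement of the tagged events
theorem main_equiv (s e : List Int) (ev : List (Int × Int))
    (hperm : ev.Perm (s.map (fun a => (a, (1 : Int))) ++ e.map (fun b => (b, (-1 : Int)))))
    (hsort : ev.Pairwise keyle)
    (hpos : ∀ p ∈ s, (0 : Int) ≤ p) :
    (match mp 0 ev with
      | none => ((0 : Int), (0 : Int))
      | some (v, q) => if (0 : Int) < v then (v, q) else (0, 0)).2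
    = (s.foldl (fun st p =>
        let c := covOf s e p
        if st.1 < c ∨ (c = st.1 ∧ p < st.2) then (c, p) else st) ((0 : Int), (0 : Int))).2 := by
  set rB := s.foldl (fun st p =>
      let c := covOf s e p
      if st.1 < c ∨ (c = st.1 ∧ p < st.2) then (c, p) else st) ((0 : Int), (0 : Int)) with hrB
  obtain ⟨h1, h2, h3⟩ := foldB s e s ((0 : Int), (0 : Int)) rB hrB
  have hub : ∀ p ∈ s, covOf s e p ≤ rB.1 := by
    intro p hp
    have h := h2 p hp
    by_cases hlt : rB.1 < covOf s e p
    · exact absurd (Or.inl hlt) h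
    · omega
  have htie : ∀ p ∈ s, covOf s e p = rB.1 → rB.2 ≤ p := by
    intro p hp hcv
    have h := h2 p hp
    by_cases hle : rB.2 ≤ p
    · exact hle
    · exact absurd (Or.inr ⟨hcv, by omega⟩) h
  rcases h3 with h30 | h3b
  · -- the fold never improved on (0, 0): every candidate coverage is ≤ 0 and B returns 0
    have hb1 : rB.1 = 0 := by rw [h30]
    have hb2 : rB.2 = 0 := by rw [h30]
    by_cases hevn : ev = []
    · rw [hevn]
      show ((0 : Int), (0 : Int)).2 = rB.2
      rw [hb2]
    · obtain ⟨v, q, l, xx, r', hmp, hsp, hq, hv, hmax⟩ := mp_spec ev 0 hevn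
      have hvle : v ≤ 0 := by
        rcases ev_tags s e ev hperm xx
            (by rw [hsp]; exact List.mem_append_right _ List.mem_cons_self) with ⟨ht1, hm1⟩ | ⟨ht1, hm1⟩
        · have hxq : xx = (q, 1) := by rw [← hq, ← ht1]
          rw [hxq] at hsp
          have hv1 : v = tagSum l + 1 := by
            rw [hv, hxq]
            show 0 + tagSum l + (1 : Int) = tagSum l + 1
            ring
          rw [hq] at hm1
          have hle := (start_split_le s e ev l r' q hperm hsort hsp).1
          have := hub q hm1
          omega
        · have hxq : xx = (q, -1) := by rw [← hq, ← ht1]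
          rw [hxq] at hsp
          have hv1 : v = tagSum l - 1 := by
            rw [hv, hxq]
            show 0 + tagSum l + (-1 : Int) = tagSum l - 1
            ring
          have hle := end_split_le s e ev l r' q hperm hsort hsp
          have hbb := below_bound s e q 0 (fun p hp => by have := hub p hp; omega) (le_refl 0)
          omega
      rw [hmp]
      show (if (0 : Int) < v then (v, q) else ((0 : Int), (0 : Int))).2 = rB.2
      rw [if_neg (by omega), hb2]
  · rcases h1 with h10 | ⟨hmem, hcov⟩
    · rw [h10] at h3b
      simp at h3b
    · -- the best candidate (rB.1 = coverage of rB.2) wins; show A's sweep picks the same point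
      have hbd0 : 0 ≤ rB.2 := hpos _ hmem
      simp only at h3b
      have hbc1 : 1 ≤ rB.1 := by
        rcases h3b with h | ⟨h, h'⟩ <;> omega
      have hmemev : ((rB.2, (1 : Int))) ∈ ev :=
        hperm.mem_iff.mpr (List.mem_append_left _ (List.mem_map.mpr ⟨rB.2, hmem, rfl⟩))
      obtain ⟨v, q, l, xx, r', hmp, hsp, hq, hv, hmax⟩ := mp_spec ev 0 (List.ne_nil_of_mem hmemev)
      obtain ⟨l₀, r₀, hsp₀, hnr₀⟩ := exists_split_last hmemev
      have hsum₀ := (start_split_le s e ev l₀ r₀ rB.2 hperm hsort hsp₀).2 hnr₀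
      have hdich := hmax l₀ (rB.2, 1) r₀ hsp₀
      have hdich' : tagSum l₀ + 1 < v ∨ (tagSum l₀ + 1 = v ∧ l.length ≤ l₀.length) := by
        rcases hdich with h | ⟨h, h'⟩
        · refine Or.inl ?_
          have : (0 : Int) + tagSum l₀ + (1 : Int) = tagSum l₀ + 1 := by ring
          omega
        · refine Or.inr ⟨?_, h'⟩
          have : (0 : Int) + tagSum l₀ + (1 : Int) = tagSum l₀ + 1 := by ring
          omega
      rcases ev_tags s e ev hperm xx
          (by rw [hsp]; exact List.mem_append_right _ List.mem_cons_self) with ⟨ht1, hm1⟩ | ⟨ht1, hm1⟩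
      · have hxq : xx = (q, 1) := by rw [← hq, ← ht1]
        rw [hxq] at hsp
        have hv1 : v = tagSum l + 1 := by
          rw [hv, hxq]
          show 0 + tagSum l + (1 : Int) = tagSum l + 1
          ring
        rw [hq] at hm1
        have hle := (start_split_le s e ev l r' q hperm hsort hsp).1
        have hubq := hub q hm1
        have hveq : v = rB.1 ∧ covOf s e q = rB.1 := by
          rcases hdich' with h | ⟨h, _⟩ <;> omega
        have hbdq : rB.2 ≤ q := htie q hm1 hveq.2
        have hlen : l.length ≤ l₀.length := by
          rcases hdich' with h | ⟨_, h⟩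
          · omega
          · exact h
        by_cases hqbd : rB.2 < q
        · exfalso
          have hg1 := split_length_ge ev l r' (q, 1) hsort hsp
          have hg0 := split_length_last ev l₀ r₀ (rB.2, 1) hsort hsp₀ hnr₀
          simp only at hg1 hg0
          have hmono : ev.countP (fun y => decide (y.1 < rB.2 ∨ (y.1 = rB.2 ∧ y.2 ≤ (1 : Int))))
              ≤ ev.countP (fun y => decide (y.1 < q ∨ (y.1 = q ∧ y.2 < (1 : Int)))) := by
            refine List.countP_mono_left ?_
            intro y _ hy
            simp only [decide_eq_true_eq] at hy ⊢
            omega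
          omega
        · have hqeq : q = rB.2 := by omega
          rw [hmp]
          show (if (0 : Int) < v then (v, q) else ((0 : Int), (0 : Int))).2 = rB.2
          rw [if_pos (by omega)]
          exact hqeq
      · exfalso
        have hxq : xx = (q, -1) := by rw [← hq, ← ht1]
        rw [hxq] at hsp
        have hv1 : v = tagSum l - 1 := by
          rw [hv, hxq]
          show 0 + tagSum l + (-1 : Int) = tagSum l - 1
          ring
        have hle := end_split_le s e ev l r' q hperm hsort hsp
        have hbb := below_bound s e q rB.1 hub (by omega)
        omega

-- ===== VERDICT (by name: the statement is the Claim_ definition above) =====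
set_option maxHeartbeats 1600000 in
theorem part2_spec : Claim_equal_part2 := by
  intro nanobots _
  show part2 nanobots = part2_alt nanobots
  simp only [part2, part2_alt]
  rw [sorted2_eq_sorted_toLex, sweep_eq]
  have hk : ∀ x y : Int × Int,
      ((toLex (x.1, x.2) : Lex (Int × Int)) ≤ toLex (y.1, y.2)) → keyle x y := by
    intro x y h
    rw [Prod.Lex.le_iff] at h
    simpa [keyle] using h
  have hmain := main_equiv
    (nanobots.map fun b => max 0 (|b.1.1| + |b.1.2.1| + |b.1.2.2| - b.2))
    (nanobots.map fun b => |b.1.1| + |b.1.2.1| + |b.1.2.2| + b.2 + 1)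
    (PySem.List.sorted (nanobots.foldl (fun q b =>
        let d := |b.1.1| + |b.1.2.1| + |b.1.2.2|
        q ++ [(max 0 (d - b.2), (1 : Int)), (d + b.2 + 1, (-1 : Int))]) [])
      (fun p => toLex (p.1, p.2)) false)
    ((PySem.List.sorted_perm _ _ _).trans (eventsA_perm nanobots))
    ((PySem.List.sorted_pairwise _ _).imp (fun {a b} h => hk a b h))
    (by
      intro p hp
      simp only [List.mem_map] at hp
      obtain ⟨b, _, rfl⟩ := hp
      exact le_max_left _ _)
  exact hmain
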